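-- pv_equiv track=rewrite | github.com/Kusaldiss365/Electromart | backend/app/agents/orders_agent.py | _wants_return_action
-- ===== SOURCE A (Python) =====
-- def _wants_return_action(text: str) -> bool:
--     """
--     User is trying to DO a return/refund/cancel/exchange, not just ask policy.
--     We intentionally do NOT trigger on the bare words "return/refund" because
--     policy questions like "What is your return policy?" would get stuck.
--     """
--     t = (text or "").lower()
--     action_phrases = [
--         "i want to return", "i wanna return", "return my", "refund my",
--         "i want a refund", "i need a refund", "i want to cancel", "cancel my",
--         "i want to exchange", "exchange my", "start a return", "create return",
--         "raise a return", "return order", "refund order", "cancel order", "exchange order"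
--     ]
--     return any(p in t for p in action_phrases)
-- ===== SOURCE B (Python) =====
-- def _wants_return_action(text: str) -> bool:
--     # One left-to-right scan over positions of the text: at each index, test
--     # whether any action phrase starts there (prefix match), instead of one
--     # substring search per phrase.
--     t = (text or "").lower()
--     phrases = (
--         "i want to return", "i wanna return", "return my", "refund my",
--         "i want a refund", "i need a refund", "i want to cancel", "cancel my",
--         "i want to exchange", "exchange my", "start a return", "create return",
--         "raise a return", "return order", "refund order", "cancel order", "exchange order"
--     )
--     for i in range(len(t) + 1):
--         if any(t.startswith(p, i) for p in phrases):
--             return True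
--     return False
-- ===== Notes on version B (the rewrite author's own statement) =====
-- stated objective: alternative
-- what changed: Replaced the loop that runs one substring search per phrase by a single left-to-right scan over text positions that prefix-tests all 17 phrases at each index.
import Mathlib
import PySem

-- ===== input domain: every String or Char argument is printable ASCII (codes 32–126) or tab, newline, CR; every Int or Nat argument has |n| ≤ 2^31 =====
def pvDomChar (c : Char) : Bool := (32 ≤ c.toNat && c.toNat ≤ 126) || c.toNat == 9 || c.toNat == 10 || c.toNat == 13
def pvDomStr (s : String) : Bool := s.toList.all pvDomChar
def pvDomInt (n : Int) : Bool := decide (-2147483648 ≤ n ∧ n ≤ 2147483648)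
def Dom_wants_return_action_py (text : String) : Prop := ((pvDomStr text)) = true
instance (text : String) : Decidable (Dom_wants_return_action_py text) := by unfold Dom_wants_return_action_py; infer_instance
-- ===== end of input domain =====

-- B replaces A's per-phrase substring loop by one left-to-right scan over text
-- positions that prefix-tests every phrase at each index (alternative, same cost).


-- ===== PORT A =====
-- the 17 action phrases, in A's order
def pvPhrasesA : List String :=
  ["i want to return", "i wanna return", "return my", "refund my",
   "i want a refund", "i need a refund", "i want to cancel", "cancel my",
   "i want to exchange", "exchange my", "start a return", "create return",
   "raise a return", "return order", "refund order", "cancel order", "exchange order"]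

-- (text or "") is the identity on str inputs (it only matters for None, outside String)
def wants_return_action_py (text : String) : Bool :=
  let t := PySem.Str.lower text
  pvPhrasesA.any (fun p => PySem.Str.isIn p t)

-- ===== PORT B =====
def pvPhrasesB : List String :=
  ["i want to return", "i wanna return", "return my", "refund my",
   "i want a refund", "i need a refund", "i want to cancel", "cancel my",
   "i want to exchange", "exchange my", "start a return", "create return",
   "raise a return", "return order", "refund order", "cancel order", "exchange order"]

-- the scan: at each suffix position try all phrases as prefixes, then advance
def pvScan (phrases : List String) : List Char → Bool
  | [] => phrases.any (fun p => p.toList.isPrefixOf [])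
  | c :: rest =>
      if phrases.any (fun p => p.toList.isPrefixOf (c :: rest)) then true
      else pvScan phrases rest

def wants_return_action_py_alt (text : String) : Bool :=
  let t := PySem.Str.lower text
  pvScan pvPhrasesB t.toList

-- ===== PRECONDITION & SPEC =====
def Spec_wants_return_action_py (text : String) (out : Bool) : Prop := out = wants_return_action_py_alt text
instance (text : String) (out : Bool) : Decidable (Spec_wants_return_action_py text out) := by unfold Spec_wants_return_action_py; infer_instance

-- ===== CLAIM (what is proved, stated in full; the proofs are below) =====
def Claim_equal_wants_return_action_py : Prop := ∀ (text : String), Dom_wants_return_action_py text → Spec_wants_return_action_py text (wants_return_action_py text)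

-- ===== LEMMAS AND PROOFS =====
theorem pvScan_iff (phrases : List String) (s : List Char) :
    pvScan phrases s = true ↔ ∃ p ∈ phrases, p.toList <:+: s := by
  induction s with
  | nil =>
      simp [pvScan, List.any_eq_true, List.isPrefixOf_iff_prefix]
  | cons c rest ih =>
      simp only [pvScan]
      split_ifs with h
      · simp only [List.any_eq_true, List.isPrefixOf_iff_prefix] at h
        obtain ⟨p, hp, hpre⟩ := h
        simp only [true_iff]
        exact ⟨p, hp, hpre.isInfix⟩
      · simp only [List.any_eq_true, List.isPrefixOf_iff_prefix, not_exists, not_and] at h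
        rw [ih]
        constructor
        · rintro ⟨p, hp, hinf⟩
          exact ⟨p, hp, hinf.trans (List.suffix_cons c rest).isInfix⟩
        · rintro ⟨p, hp, hinf⟩
          rcases List.infix_cons_iff.mp hinf with hpre | hinf'
          · exact absurd hpre (h p hp)
          · exact ⟨p, hp, hinf'⟩

-- ===== VERDICT (by name: the statement is the Claim_ definition above) =====
theorem wants_return_action_py_spec : Claim_equal_wants_return_action_py := by
  intro text _
  unfold Spec_wants_return_action_py wants_return_action_py wants_return_action_py_alt
  rw [Bool.eq_iff_iff, pvScan_iff]
  simp only [List.any_eq_true, PySem.Str.isIn_iff_infix]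
  rfl
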